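-- pv_equiv track=rewrite | github.com/DICKY1987/Gov_Reg | RUNTIME/engine/PHASE_5_EXECUTION/TOOLS/DOC-AUTOMATION-SCHEMA-DOCS-001__schema_doc_generator.py | generate_index
-- ===== SOURCE A (Python) =====
-- from typing import Dict, List
--
-- def generate_index(schemas: List[Dict]) -> str:
--     """Generate index of all schemas"""
--     doc = ["# Schema Index\n"]
--     doc.append("Complete index of all schemas in the repository.\n")
--
--     by_category = {}
--     for schema in schemas:
--         category = schema.get('category', 'other')
--         if category not in by_category:
--             by_category[category] = []
--         by_category[category].append(schema)
--
--     for category in sorted(by_category.keys()):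
--         doc.append(f"## {category.capitalize()} Schemas\n")
--         for schema in sorted(by_category[category], key=lambda s: s.get('schema_id', '')):
--             doc.append(f"- [{schema.get('title', schema.get('schema_id'))}]({schema.get('path')})")
--         doc.append("")
--
--     return '\n'.join(doc)
-- ===== SOURCE B (Python) =====
-- def generate_index(schemas):
--     """Generate index of all schemas"""
--     doc = ["# Schema Index\n", "Complete index of all schemas in the repository.\n"]
--     for category in sorted({s.get('category', 'other') for s in schemas}):
--         doc.append(f"## {category.capitalize()} Schemas\n")
--         group = [s for s in schemas if s.get('category', 'other') == category]
--         for schema in sorted(group, key=lambda s: s.get('schema_id', '')):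
--             doc.append(f"- [{schema.get('title', schema.get('schema_id'))}]({schema.get('path')})")
--         doc.append("")
--     return '\n'.join(doc)
-- ===== Notes on version B (the rewrite author's own statement) =====
-- stated objective: simpler
-- what changed: Drops A's build-a-dict-of-lists-then-sort-its-keys decomposition: B computes the sorted set of categories directly and, per category, filters the schema list and sorts the group, so no intermediate dict is built or mutated.
import Mathlib
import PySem

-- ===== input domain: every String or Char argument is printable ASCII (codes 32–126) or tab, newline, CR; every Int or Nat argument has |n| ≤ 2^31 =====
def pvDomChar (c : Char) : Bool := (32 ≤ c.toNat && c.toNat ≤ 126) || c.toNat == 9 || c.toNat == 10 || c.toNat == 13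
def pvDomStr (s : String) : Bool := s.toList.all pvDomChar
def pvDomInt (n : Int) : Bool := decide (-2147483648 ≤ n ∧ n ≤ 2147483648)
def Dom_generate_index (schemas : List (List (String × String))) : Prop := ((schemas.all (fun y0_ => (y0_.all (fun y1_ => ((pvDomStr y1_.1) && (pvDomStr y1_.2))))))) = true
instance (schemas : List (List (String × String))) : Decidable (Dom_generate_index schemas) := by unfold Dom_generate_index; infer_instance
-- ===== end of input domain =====

-- B replaces A's build-a-dict-of-lists-then-sort-its-keys decomposition by sorting the distinct
-- categories directly and filtering the schema list per category (objective: simpler — no mutated dict).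
-- Shared helpers: both Pythons call the same .get / .capitalize / f-string expressions.

-- schema.get(k) : first match in the association list, none = absent (Python None)
def pvGet? (s : List (String × String)) (k : String) : Option String :=
  (s.find? (fun p => p.1 == k)).map (fun p => p.2)

-- schema.get(k, d)
def pvGetD (s : List (String × String)) (k d : String) : String :=
  (pvGet? s k).getD d

-- str.capitalize(): first char uppercased, rest lowercased (exact on the ASCII domain)
def pvCap (s : String) : String :=
  match s.toList with
  | [] => ""
  | c :: rest => String.ofList (PySem.Chars.upperChar c :: PySem.Chars.lower rest)

-- f"## {category.capitalize()} Schemas\n"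
def pvHeading (category : String) : String :=
  "## " ++ pvCap category ++ " Schemas\n"

-- f"- [{schema.get('title', schema.get('schema_id'))}]({schema.get('path')})"  (absent keys print as "None")
def pvEntry (schema : List (String × String)) : String :=
  "- [" ++ ((pvGet? schema "title").getD ((pvGet? schema "schema_id").getD "None")) ++
  "](" ++ ((pvGet? schema "path").getD "None") ++ ")"

-- ===== PORT A =====
def generate_index (schemas : List (List (String × String))) : String :=
  let doc : List String := ["# Schema Index\n"]
  let doc := doc ++ ["Complete index of all schemas in the repository.\n"]
  let by_category : PySem.Dict String (List (List (String × String))) :=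
    schemas.foldl (fun d schema =>
      let category := pvGetD schema "category" "other"
      let d := if d.contains category then d else d.insert category []
      d.modify category [] (fun g => g ++ [schema])) PySem.Dict.empty
  let doc := (PySem.List.sorted by_category.keys (fun c => c) false).foldl (fun doc category =>
      let doc := doc ++ [pvHeading category]
      let doc := (PySem.List.sorted (by_category.getD category [])
          (fun s => pvGetD s "schema_id" "") false).foldl
          (fun doc schema => doc ++ [pvEntry schema]) doc
      doc ++ [""]) doc
  PySem.Str.join "\n" doc

-- ===== PORT B =====
def generate_index_alt (schemas : List (List (String × String))) : String :=
  let doc0 : List String := ["# Schema Index\n", "Complete index of all schemas in the repository.\n"]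
  let cats := PySem.List.sorted
      (PySem.Set.ofList (schemas.map (fun s => pvGetD s "category" "other"))) (fun c => c) false
  let doc := cats.foldl (fun doc category =>
      let group := schemas.filter (fun s => pvGetD s "category" "other" == category)
      doc ++ ([pvHeading category] ++
        (PySem.List.sorted group (fun s => pvGetD s "schema_id" "") false).map pvEntry ++ [""])) doc0
  PySem.Str.join "\n" doc

-- ===== PRECONDITION & SPEC =====
def Spec_generate_index (schemas : List (List (String × String))) (out : String) : Prop := out = generate_index_alt schemas
instance (schemas : List (List (String × String))) (out : String) : Decidable (Spec_generate_index schemas out) := by unfold Spec_generate_index; infer_instance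

-- ===== CLAIM (what is proved, stated in full; the proofs are below) =====
def Claim_equal_generate_index : Prop := ∀ (schemas : List (List (String × String))), Dom_generate_index schemas → Spec_generate_index schemas (generate_index schemas)

-- ===== LEMMAS AND PROOFS =====

-- the categorised-dict fold of A, with the insert-if-absent step already fused into a plain modify
def pvByCat (schemas : List (List (String × String))) :
    PySem.Dict String (List (List (String × String))) :=
  schemas.foldl (fun d schema =>
    d.modify (pvGetD schema "category" "other") [] (fun g => g ++ [schema])) PySem.Dict.empty

-- "if category not in d: d[category] = []" followed by "d[category].append(schema)" is one modify
lemma pv_step_eq (d : PySem.Dict String (List (List (String × String))))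
    (schema : List (String × String)) (c : String) :
    (if d.contains c then d else d.insert c []).modify c [] (fun g => g ++ [schema]) =
      d.modify c [] (fun g => g ++ [schema]) := by
  by_cases h : d.contains c
  · simp [h]
  · rw [if_neg (by simp [h])]
    have h' : d.contains c = false := by simpa using h
    simp [PySem.Dict.modify, PySem.Dict.getD_insert_self, PySem.Dict.insert_insert_self,
      PySem.Dict.getD_of_not_contains, h']

lemma pv_byCat_eq (schemas : List (List (String × String))) :
    schemas.foldl (fun d schema =>
      let category := pvGetD schema "category" "other"
      let d := if d.contains category then d else d.insert category []
      d.modify category [] (fun g => g ++ [schema])) PySem.Dict.empty = pvByCat schemas := by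
  unfold pvByCat
  congr 1
  funext d schema
  exact pv_step_eq d schema _

lemma pv_keys (schemas : List (List (String × String))) :
    (pvByCat schemas).keys =
      PySem.Set.ofList (schemas.map (fun s => pvGetD s "category" "other")) := by
  unfold pvByCat
  rw [PySem.Dict.keys_foldl_modify_key schemas (fun s => pvGetD s "category" "other") []
    (fun _ schema => (fun g => g ++ [schema])) PySem.Dict.empty]
  simp [PySem.Set.update_nil_left]

lemma pv_filter_of_map (schemas : List (List (String × String))) (c : String) :
    List.map (fun x : String × List (String × String) => x.2)
      (List.filter (fun p => p.1 == c)
        (schemas.map (fun s => (pvGetD s "category" "other", s)))) =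
      schemas.filter (fun s => pvGetD s "category" "other" == c) := by
  induction schemas with
  | nil => rfl
  | cons a t ih => by_cases h : pvGetD a "category" "other" == c <;> simp [h, ih]

lemma pv_getD (schemas : List (List (String × String))) (c : String) :
    (pvByCat schemas).getD c [] =
      schemas.filter (fun s => pvGetD s "category" "other" == c) := by
  have h := PySem.Dict.getD_foldl_modify_append
    (schemas.map (fun s => (pvGetD s "category" "other", s))) PySem.Dict.empty c
  rw [List.foldl_map] at h
  unfold pvByCat
  rw [h, PySem.Dict.getD_empty, List.nil_append]
  exact pv_filter_of_map schemas c

-- ===== VERDICT (by name: the statement is the Claim_ definition above) =====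
theorem generate_index_spec : Claim_equal_generate_index := by
  intro schemas _
  unfold Spec_generate_index generate_index generate_index_alt
  simp only [List.singleton_append]
  rw [pv_byCat_eq, pv_keys]
  congr 1
  apply PySem.List.foldl_congr_mem
  intro acc c _
  rw [PySem.List.foldl_append_singleton_eq_map pvEntry]
  simp [pv_getD, List.append_assoc]
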